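-- pv_equiv track=rewrite | github.com/ciromolina86/project-euler | problem-archives/21-30/24-lexicographic-permutations.py | findIndexK
-- ===== SOURCE A (Python) =====
-- def findIndexK(a):
--     """Find the largest index k such that a[k] < a[k + 1].
--     If no such index exists, the permutation is the last permutation."""
--     n = len(a)
--     ks = []
--
--     for i in range(n - 1):
--         if a[i] < a[i + 1]:
--             ks.append(i)
--
--     if len(ks) == 0:
--         return None
--     else:
--         return max(ks)
-- ===== SOURCE B (Python) =====
-- def findIndexK(a):
--     """Find the largest index k such that a[k] < a[k + 1].
--     If no such index exists, the permutation is the last permutation."""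
--     for i in range(len(a) - 2, -1, -1):
--         if a[i] < a[i + 1]:
--             return i
--     return None
-- ===== Notes on version B (the rewrite author's own statement) =====
-- stated objective: simpler
-- what changed: B scans backward from index n-2 and returns immediately at the first (hence largest) index with a[i] < a[i+1], maintaining no list and taking no max, instead of A's forward pass collecting all qualifying indices and then calling max.
import Mathlib
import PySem

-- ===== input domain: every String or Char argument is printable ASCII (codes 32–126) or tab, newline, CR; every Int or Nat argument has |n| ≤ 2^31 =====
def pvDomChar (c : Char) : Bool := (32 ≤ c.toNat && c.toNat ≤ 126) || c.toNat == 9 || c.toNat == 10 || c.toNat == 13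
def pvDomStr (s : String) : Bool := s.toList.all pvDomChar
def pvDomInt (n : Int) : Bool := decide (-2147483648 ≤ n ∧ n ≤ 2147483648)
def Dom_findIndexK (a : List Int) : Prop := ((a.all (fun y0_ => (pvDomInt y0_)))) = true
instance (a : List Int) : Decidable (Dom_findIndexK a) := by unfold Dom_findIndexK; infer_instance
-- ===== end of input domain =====

-- B replaces A's forward collect-then-max pass by a backward scan returning the first qualifying index; same return value, no speed claim.

-- ===== PORT A =====
def findIndexK (a : List Int) : Option Int :=
  let n : Int := PySem.List.len a
  let ks : List Int :=
    (PySem.List.pyRange 0 (n - 1) 1).foldl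
      (fun ks i =>
        if PySem.List.pyGetD a i 0 < PySem.List.pyGetD a (i + 1) 0 then ks ++ [i] else ks) []
  if ks.length = 0 then none else PySem.List.max? ks (fun x => x)

-- ===== PORT B =====
def findIndexK_alt (a : List Int) : Option Int :=
  (PySem.List.pyRange (PySem.List.len a - 2) (-1) (-1)).find?
    (fun i => decide (PySem.List.pyGetD a i 0 < PySem.List.pyGetD a (i + 1) 0))

-- ===== PRECONDITION & SPEC =====
def Spec_findIndexK (a : List Int) (out : Option Int) : Prop := out = findIndexK_alt a
instance (a : List Int) (out : Option Int) : Decidable (Spec_findIndexK a out) := by unfold Spec_findIndexK; infer_instance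

-- ===== CLAIM (what is proved, stated in full; the proofs are below) =====
def Claim_equal_findIndexK : Prop := ∀ (a : List Int), Dom_findIndexK a → Spec_findIndexK a (findIndexK a)

-- ===== LEMMAS AND PROOFS =====

-- find? over a reversed list returns the LAST match, i.e. the last element of the filter.
theorem pv_find?_reverse {α : Type} (p : α → Bool) (l : List α) :
    l.reverse.find? p = (l.filter p).getLast? := by
  induction l with
  | nil => simp
  | cons x t ih =>
    by_cases hx : p x = true
    · cases hft : t.filter p with
      | nil =>
        have : t.reverse.find? p = none := by rw [ih, hft]; rfl
        simp [List.find?_append, this, hx, hft]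
      | cons y r =>
        have : t.reverse.find? p = (y :: r).getLast? := by rw [ih, hft]
        simp [List.find?_append, this, hx, hft, List.getLast?_cons]
    · simp only [List.reverse_cons, List.find?_append, ih, List.filter_cons, hx]
      cases hft : t.filter p with
      | nil => simp [hx]
      | cons y r => simp [hx, List.getLast?_cons]

-- Python max on a strictly increasing list is its last element.
theorem pv_foldl_max_pairwise (t : List Int) (x : Int)
    (h : (x :: t).Pairwise (· < ·)) : t.foldl max x = t.getLastD x := by
  induction t generalizing x with
  | nil => rfl
  | cons y r ih =>
    have hxy : x < y := (List.pairwise_cons.mp h).1 y (by simp)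
    have ht : (y :: r).Pairwise (· < ·) := (List.pairwise_cons.mp h).2
    have : max x y = y := max_eq_right hxy.le
    simp only [List.foldl_cons, this, List.getLastD_cons]
    exact ih y ht

theorem pv_max?_pairwise (l : List Int) (h : l.Pairwise (· < ·)) :
    PySem.List.max? l (fun x => x) = l.getLast? := by
  cases l with
  | nil => rfl
  | cons x t =>
    rw [PySem.List.max?_id_cons, pv_foldl_max_pairwise t x h, List.getLast?_cons]
    simp [List.getLastD_eq_getLast?]

-- ===== VERDICT (by name: the statement is the Claim_ definition above) =====
theorem findIndexK_spec : Claim_equal_findIndexK := by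
  intro a _
  unfold Spec_findIndexK findIndexK findIndexK_alt
  simp only [PySem.List.foldl_append_ite_eq_filter, List.nil_append]
  have hrev : PySem.List.pyRange (PySem.List.len a - 2) (-1) (-1)
      = (PySem.List.pyRange 0 (PySem.List.len a - 1) 1).reverse := by
    have h := PySem.List.pyRange_neg_one_eq_reverse (PySem.List.len a - 2) (-1)
    have h0 : ((-1 : Int) + 1) = 0 := by norm_num
    have h1 : (PySem.List.len a - 2 + 1) = PySem.List.len a - 1 := by ring
    rw [h0, h1] at h
    exact h
  rw [hrev, pv_find?_reverse]
  set p : Int → Bool := fun i => decide (PySem.List.pyGetD a i 0 < PySem.List.pyGetD a (i + 1) 0) with hp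
  have hfil : ((PySem.List.pyRange 0 (PySem.List.len a - 1) 1).filter p).Pairwise (· < ·) :=
    (PySem.List.pairwise_lt_pyRange_one 0 (PySem.List.len a - 1)).sublist
      List.filter_sublist
  cases hft : (PySem.List.pyRange 0 (PySem.List.len a - 1) 1).filter p with
  | nil => simp
  | cons y r =>
    rw [hft] at hfil
    have hm := pv_max?_pairwise (y :: r) hfil
    simp [hm]
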